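-- pv_equiv track=rewrite | github.com/daniellindem/dwarvenrealms-discord-bot | function_app.py | get_offhand_type
-- ===== SOURCE A (Python) =====
-- def get_offhand_type(trinketmod, gobletmod, hornmod):
--     offhands = ["Arcane Apocalypse","Chain Lightning","Spinning Blade","Eye of the Storm","Lightning Plasma","Delusions of Zelkor","Vortex","Dragon Flames","Ferocity of Wolves","Fire Orb","Arcane Orb","Carnage of Fire","Cracked Arcane Seed","Starblades","Fire Totem","Lightning Totem","Toxicity","Burning Shield","Rain of Fire","Electric Dragons","Arcane Totem","Blood Dragons","Fire Beam","Death Blades","Spark"]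
--
--     offhand_counts = {}
--     for offhand in offhands:
--         offhand_counts[offhand] = 0
--
--     for mod in [trinketmod.lower(), gobletmod.lower(), hornmod.lower()]:
--         for offhand in offhands:
--             if offhand.lower() in mod:
--                 offhand_counts[offhand] += 1
--
--     for offhand, count in offhand_counts.items():
--         if count >= 2:
--             return offhand
--
--     return None
-- ===== SOURCE B (Python) =====
-- def get_offhand_type(trinketmod, gobletmod, hornmod):
--     offhands = ["Arcane Apocalypse","Chain Lightning","Spinning Blade","Eye of the Storm","Lightning Plasma","Delusions of Zelkor","Vortex","Dragon Flames","Ferocity of Wolves","Fire Orb","Arcane Orb","Carnage of Fire","Cracked Arcane Seed","Starblades","Fire Totem","Lightning Totem","Toxicity","Burning Shield","Rain of Fire","Electric Dragons","Arcane Totem","Blood Dragons","Fire Beam","Death Blades","Spark"]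
--     mods = [trinketmod.lower(), gobletmod.lower(), hornmod.lower()]
--     for offhand in offhands:
--         if sum(offhand.lower() in m for m in mods) >= 2:
--             return offhand
--     return None
-- ===== Notes on version B (the rewrite author's own statement) =====
-- stated objective: simpler
-- what changed: Replaced the two-phase shape (initialize a count dict over all offhands, accumulate over mods, then re-scan the dict) by a single pass over the offhands list that computes each offhand's occurrence count directly over the three lowered mods and returns at the first count >= 2.
import Mathlib
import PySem

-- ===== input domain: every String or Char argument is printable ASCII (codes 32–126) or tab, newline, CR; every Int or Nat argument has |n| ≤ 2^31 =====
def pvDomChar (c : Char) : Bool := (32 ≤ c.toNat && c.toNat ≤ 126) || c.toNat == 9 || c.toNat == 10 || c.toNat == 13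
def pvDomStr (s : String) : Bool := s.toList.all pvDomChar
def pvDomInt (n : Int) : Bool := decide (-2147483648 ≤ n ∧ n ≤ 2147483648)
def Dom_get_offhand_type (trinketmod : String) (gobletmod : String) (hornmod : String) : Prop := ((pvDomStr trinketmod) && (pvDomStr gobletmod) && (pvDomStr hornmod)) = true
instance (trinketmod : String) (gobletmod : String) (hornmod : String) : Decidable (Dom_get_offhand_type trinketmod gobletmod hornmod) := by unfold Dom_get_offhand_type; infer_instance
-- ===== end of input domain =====

-- B replaces A's build-a-count-dict-then-rescan shape by one pass over the offhands
-- list computing each count directly and returning at the first count >= 2 (simpler).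


-- the offhands literal shared by both ports (same literal in both Pythons)
def pvOffhands : List String := ["Arcane Apocalypse","Chain Lightning","Spinning Blade","Eye of the Storm","Lightning Plasma","Delusions of Zelkor","Vortex","Dragon Flames","Ferocity of Wolves","Fire Orb","Arcane Orb","Carnage of Fire","Cracked Arcane Seed","Starblades","Fire Totem","Lightning Totem","Toxicity","Burning Shield","Rain of Fire","Electric Dragons","Arcane Totem","Blood Dragons","Fire Beam","Death Blades","Spark"]

-- ===== PORT A =====
-- A's final 'for offhand, count in offhand_counts.items(): if count >= 2: return offhand'
def pvScanA : List (String × Int) → Option String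
  | [] => none
  | (o, c) :: rest => if 2 ≤ c then some o else pvScanA rest

def get_offhand_type (trinketmod : String) (gobletmod : String) (hornmod : String) : Option String :=
  let offhands := pvOffhands
  let counts0 := offhands.foldl (fun d o => d.insert o (0 : Int)) PySem.Dict.empty
  let counts := [PySem.Str.lower trinketmod, PySem.Str.lower gobletmod, PySem.Str.lower hornmod].foldl
      (fun d m => offhands.foldl
        (fun d o => if PySem.Str.isIn (PySem.Str.lower o) m then d.modify o 0 (· + 1) else d) d)
      counts0
  pvScanA counts.items

-- ===== PORT B =====
-- sum(offhand.lower() in m for m in mods)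
def pvCountB (mods : List String) (o : String) : Int :=
  mods.foldl (fun n m => n + (if PySem.Str.isIn (PySem.Str.lower o) m then 1 else 0)) 0

-- B's single loop with its early return
def pvFirstB (mods : List String) : List String → Option String
  | [] => none
  | o :: rest => if 2 ≤ pvCountB mods o then some o else pvFirstB mods rest

def get_offhand_type_alt (trinketmod : String) (gobletmod : String) (hornmod : String) : Option String :=
  pvFirstB [PySem.Str.lower trinketmod, PySem.Str.lower gobletmod, PySem.Str.lower hornmod] pvOffhands

-- ===== PRECONDITION & SPEC =====
def Spec_get_offhand_type (trinketmod : String) (gobletmod : String) (hornmod : String) (out : Option String) : Prop := out = get_offhand_type_alt trinketmod gobletmod hornmod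
instance (trinketmod : String) (gobletmod : String) (hornmod : String) (out : Option String) : Decidable (Spec_get_offhand_type trinketmod gobletmod hornmod out) := by unfold Spec_get_offhand_type; infer_instance

-- ===== CLAIM (what is proved, stated in full; the proofs are below) =====
def Claim_equal_get_offhand_type : Prop := ∀ (trinketmod : String) (gobletmod : String) (hornmod : String), Dom_get_offhand_type trinketmod gobletmod hornmod → Spec_get_offhand_type trinketmod gobletmod hornmod (get_offhand_type trinketmod gobletmod hornmod)

-- ===== LEMMAS AND PROOFS =====

-- one pass of A's inner loop over a dict containing all its keys: keys unchanged
theorem pvKeysInner (m : String) : ∀ (os : List String) (d : PySem.Dict String Int),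
    (∀ x ∈ os, d.contains x = true) →
    (os.foldl (fun d o => if PySem.Str.isIn (PySem.Str.lower o) m then d.modify o 0 (· + 1) else d) d).keys = d.keys := by
  intro os
  induction os with
  | nil => intro d _; rfl
  | cons x rest ih =>
    intro d hc
    simp only [List.foldl_cons]
    by_cases hp : PySem.Str.isIn (PySem.Str.lower x) m = true
    · rw [if_pos hp, ih]
      · rw [PySem.Dict.keys_modify, PySem.Dict.keys_insert_of_contains _ _ (hc x (by simp))]
      · intro y hy
        rw [PySem.Dict.contains_modify]
        simp [hc y (List.mem_cons_of_mem _ hy)]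
    · rw [if_neg hp, ih]
      intro y hy; exact hc y (List.mem_cons_of_mem _ hy)

-- one pass of A's inner loop: the count at key o grows by the indicator
theorem pvGetDInner (m : String) : ∀ (os : List String) (d : PySem.Dict String Int) (o : String),
    os.Nodup →
    (os.foldl (fun d o => if PySem.Str.isIn (PySem.Str.lower o) m then d.modify o 0 (· + 1) else d) d).getD o 0
      = d.getD o 0 + (if o ∈ os ∧ PySem.Str.isIn (PySem.Str.lower o) m = true then 1 else 0) := by
  intro os
  induction os with
  | nil => intro d o _; simp
  | cons x rest ih =>
    intro d o hnd
    have hnd' : rest.Nodup := hnd.of_cons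
    simp only [List.foldl_cons]
    by_cases hp : PySem.Str.isIn (PySem.Str.lower x) m = true
    · rw [if_pos hp, ih _ _ hnd', PySem.Dict.getD_modify]
      simp only [PySem.Str.isIn_eq, PySem.Str.toList_lower] at hp
      by_cases hxo : o = x
      · subst hxo
        have ho : o ∉ rest := (List.nodup_cons.mp hnd).1
        simp [hp, ho]
      · simp only [if_neg hxo]
        by_cases hor : o ∈ rest <;> simp [hor, hxo, List.mem_cons]
    · rw [if_neg hp, ih _ _ hnd']
      simp only [PySem.Str.isIn_eq, PySem.Str.toList_lower] at hp
      by_cases hxo : o = x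
      · subst hxo; simp [hp]
      · simp [List.mem_cons, hxo]

-- A's rescan of a dict whose items are os paired with counts agreeing with B's counts = B's single loop
theorem pvScanEq (mods : List String) (f : String → Int) : ∀ (os : List String),
    (∀ o ∈ os, f o = pvCountB mods o) →
    pvScanA (os.map (fun o => (o, f o))) = pvFirstB mods os := by
  intro os
  induction os with
  | nil => intro _; rfl
  | cons x rest ih =>
    intro h
    simp only [List.map_cons, pvScanA, pvFirstB, h x (by simp)]
    rw [ih (fun o ho => h o (List.mem_cons_of_mem _ ho))]

theorem pvOffhands_nodup : pvOffhands.Nodup := by decide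

-- ===== VERDICT (by name: the statement is the Claim_ definition above) =====
theorem get_offhand_type_spec : Claim_equal_get_offhand_type := by
  intro t g h _
  unfold Spec_get_offhand_type get_offhand_type get_offhand_type_alt
  set m1 := PySem.Str.lower t
  set m2 := PySem.Str.lower g
  set m3 := PySem.Str.lower h
  -- the init dict
  have hfresh : ∀ a ∈ pvOffhands, (PySem.Dict.empty : PySem.Dict String Int).contains a = false := by
    intro a _; simp [PySem.Dict.contains_empty]
  have hitems0 : (pvOffhands.foldl (fun d o => d.insert o (0 : Int)) PySem.Dict.empty).items
      = pvOffhands.map (fun o => (o, (0 : Int))) := by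
    have := PySem.Dict.items_foldl_insert_fresh pvOffhands (fun o => o) (fun _ => (0 : Int))
      PySem.Dict.empty hfresh (by simpa using pvOffhands_nodup)
    simpa using this
  set d0 := pvOffhands.foldl (fun d o => d.insert o (0 : Int)) PySem.Dict.empty with hd0
  have hkeys0 : d0.keys = pvOffhands := by
    show d0.items.map Prod.fst = _
    have hid : (Prod.fst ∘ fun o : String => (o, (0 : Int))) = id := rfl
    rw [hitems0, List.map_map, hid, List.map_id]
  have hnd0 : d0.keys.Nodup := by rw [hkeys0]; exact pvOffhands_nodup
  have hget0 : ∀ o ∈ pvOffhands, d0.getD o 0 = 0 := by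
    intro o ho
    exact PySem.Dict.getD_of_mem_items d0 (by rw [hitems0]; exact List.mem_map.mpr ⟨o, ho, rfl⟩) hnd0 0
  -- unfold the outer fold over the three mods
  simp only [List.foldl_cons, List.foldl_nil]
  set step := fun (d : PySem.Dict String Int) (m : String) => pvOffhands.foldl
      (fun d o => if PySem.Str.isIn (PySem.Str.lower o) m then d.modify o 0 (· + 1) else d) d with hstep
  have hcont : ∀ (d : PySem.Dict String Int), d.keys = pvOffhands → ∀ x ∈ pvOffhands, d.contains x = true := by
    intro d hk x hx
    exact (PySem.Dict.contains_iff_mem_keys d x).mpr (hk ▸ hx)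
  have hkeys_step : ∀ (d : PySem.Dict String Int) (m : String), d.keys = pvOffhands → (step d m).keys = pvOffhands := by
    intro d m hk
    rw [hstep]; rw [pvKeysInner m pvOffhands d (hcont d hk)]; exact hk
  have hk1 := hkeys_step d0 m1 hkeys0
  have hk2 := hkeys_step _ m2 hk1
  have hk3 := hkeys_step _ m3 hk2
  set dF := step (step (step d0 m1) m2) m3 with hdF
  have hndF : dF.keys.Nodup := by rw [hdF, hk3]; exact pvOffhands_nodup
  have hgetF : ∀ o ∈ pvOffhands, dF.getD o 0 = pvCountB [m1, m2, m3] o := by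
    intro o ho
    rw [hdF, hstep]
    rw [pvGetDInner m3 pvOffhands _ o pvOffhands_nodup,
        pvGetDInner m2 pvOffhands _ o pvOffhands_nodup,
        pvGetDInner m1 pvOffhands _ o pvOffhands_nodup,
        hget0 o ho]
    simp only [pvCountB, List.foldl_cons, List.foldl_nil, ho, true_and]
  have hitemsF : dF.items = pvOffhands.map (fun o => (o, dF.getD o 0)) := by
    rw [PySem.Dict.items_eq_map_keys dF hndF 0, hdF, hk3]
  show pvScanA dF.items = _
  rw [hitemsF, pvScanEq [m1, m2, m3] (fun o => dF.getD o 0) pvOffhands hgetF]
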